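-- pv_equiv track=rewrite | github.com/minerdev2020/codingTest | 43.divide_two_integers.py | divide1
-- ===== SOURCE A (Python) =====
-- def divide1(dividend: int, divisor: int) -> int:
--     x = dividend
--     y = divisor
--     ans = 0
--     xx, yy = abs(x), abs(y)
--     for i in range(32, -1, -1):
--         if xx >= (yy << i):
--             xx -= (yy << i)
--             ans += (1 << i)
--
--     if (x > 0 and y < 0) or (x < 0 and y > 0):
--         ans = -ans
--
--     return min(2 ** 31 - 1, max(-2 ** 31, ans))
-- ===== SOURCE B (Python) =====
-- def divide1(dividend: int, divisor: int) -> int: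
--     q = abs(dividend) // abs(divisor)
--     if (dividend < 0) != (divisor < 0):
--         q = -q
--     return min(2 ** 31 - 1, max(-2 ** 31, q))
-- ===== Notes on version B (the rewrite author's own statement) =====
-- stated objective: simpler
-- what changed: Replaces the 33-iteration shift-and-subtract loop by a direct floor division of the magnitudes with a sign flip when the operands' signs differ, keeping the same clamp.
-- outside the precondition, e.g. on divide1(7, 0): A returns 2147483647, B raises ZeroDivisionError
import Mathlib
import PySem

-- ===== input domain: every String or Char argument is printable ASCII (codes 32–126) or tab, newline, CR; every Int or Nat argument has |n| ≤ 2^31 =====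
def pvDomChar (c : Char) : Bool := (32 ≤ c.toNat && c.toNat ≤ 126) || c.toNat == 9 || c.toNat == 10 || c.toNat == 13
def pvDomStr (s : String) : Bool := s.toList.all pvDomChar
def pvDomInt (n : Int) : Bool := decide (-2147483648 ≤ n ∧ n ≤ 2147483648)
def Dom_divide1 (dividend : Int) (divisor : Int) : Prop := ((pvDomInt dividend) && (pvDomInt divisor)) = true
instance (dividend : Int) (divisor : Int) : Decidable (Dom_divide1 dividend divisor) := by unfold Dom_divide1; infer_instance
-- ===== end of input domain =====

-- B replaces A's 33-step shift-and-subtract loop by one floor division of the magnitudes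
-- plus a sign flip (simpler); equivalence proved for divisor ≠ 0.


-- ===== PORT A =====
-- loop body of A; 'yy << i' / '1 << i' are exact as yy * 2^i.toNat / 2^i.toNat since every i of range(32,-1,-1) is ≥ 0
def divide1Step (yy : Int) (st : Int × Int) (i : Int) : Int × Int :=
  if yy * 2 ^ i.toNat ≤ st.1 then (st.1 - yy * 2 ^ i.toNat, st.2 + 1 * 2 ^ i.toNat) else st

def divide1 (dividend : Int) (divisor : Int) : Int :=
  let x := dividend
  let y := divisor
  let xx := |x|
  let yy := |y|
  let st := (PySem.List.pyRange 32 (-1) (-1)).foldl (divide1Step yy) (xx, 0)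
  let ans := if (x > 0 ∧ y < 0) ∨ (x < 0 ∧ y > 0) then -st.2 else st.2
  min (2 ^ 31 - 1) (max (-(2 ^ 31)) ans)

-- ===== PORT B =====
def divide1_alt (dividend : Int) (divisor : Int) : Int :=
  let q := PySem.Int.floordiv |dividend| |divisor|
  let q := if decide (dividend < 0) ≠ decide (divisor < 0) then -q else q
  min (2 ^ 31 - 1) (max (-(2 ^ 31)) q)

-- ===== PRECONDITION & SPEC =====
-- Pre_ excludes divisor = 0, on which A's degenerate loop overflows and returns the clamp value
-- 2147483647 (an artefact of the shift loop), while B's floor division raises ZeroDivisionError.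
def Pre_divide1 (dividend : Int) (divisor : Int) : Prop := divisor ≠ 0
instance (dividend : Int) (divisor : Int) : Decidable (Pre_divide1 dividend divisor) := by unfold Pre_divide1; infer_instance
def pvWitness_divide1 : Int × Int := (7, 2)
def Spec_divide1 (dividend : Int) (divisor : Int) (out : Int) : Prop := out = divide1_alt dividend divisor
instance (dividend : Int) (divisor : Int) (out : Int) : Decidable (Spec_divide1 dividend divisor out) := by unfold Spec_divide1; infer_instance

-- ===== CLAIM (what is proved, stated in full; the proofs are below) =====
def Claim_equal_divide1 : Prop := ∀ (dividend : Int) (divisor : Int), Dom_divide1 dividend divisor → Pre_divide1 dividend divisor → Spec_divide1 dividend divisor (divide1 dividend divisor)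

-- ===== LEMMAS AND PROOFS =====

-- the loop exponents of A, as the reversed Nat range
lemma divide1_range_eq :
    PySem.List.pyRange 32 (-1) (-1) = (List.range 33).reverse.map Int.ofNat := by
  decide

-- shift-and-subtract invariant: folding over exponents n-1 … 0 performs Euclidean division
lemma divide1_fold_div (yy : Int) (hy : 0 < yy) :
    ∀ (n : Nat) (xx a : Int), 0 ≤ xx → xx < yy * 2 ^ n →
      ((List.range n).reverse.map Int.ofNat).foldl (divide1Step yy) (xx, a)
        = (xx % yy, a + xx / yy) := by
  intro n
  induction n with
  | zero =>
      intro xx a h0 hlt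
      simp only [List.range_zero, List.reverse_nil, List.map_nil, List.foldl_nil]
      rw [Int.emod_eq_of_lt h0 (by simpa using hlt), Int.ediv_eq_zero_of_lt h0 (by simpa using hlt)]
      simp
  | succ n ih =>
      intro xx a h0 hlt
      rw [List.range_succ, List.reverse_append, List.map_append]
      simp only [List.reverse_cons, List.reverse_nil, List.nil_append, List.map_cons,
        List.map_nil, List.cons_append, List.nil_append, List.foldl_cons]
      have h2 : (0:Int) < 2 ^ n := by positivity
      by_cases hc : yy * 2 ^ n ≤ xx
      · have hstep : divide1Step yy (xx, a) (Int.ofNat n)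
            = (xx - yy * 2 ^ n, a + 1 * 2 ^ n) := by
          simp [divide1Step, hc]
        rw [hstep, ih (xx - yy * 2 ^ n) (a + 1 * 2 ^ n) (by omega)
              (by have := hlt; rw [pow_succ] at this; nlinarith)]
        have hx : xx = (xx - yy * 2 ^ n) + yy * (2 ^ n) := by ring
        simp only [Prod.mk.injEq]
        refine ⟨?_, ?_⟩
        · conv_rhs => rw [hx]
          rw [Int.add_mul_emod_self_left]
        · conv_rhs => rw [hx]
          rw [Int.add_mul_ediv_left _ _ (by omega : yy ≠ 0)]
          ring
      · have hstep : divide1Step yy (xx, a) (Int.ofNat n) = (xx, a) := by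
          simp [divide1Step]
          omega
        rw [hstep, ih xx a h0 (by omega)]

-- ===== VERDICT (by name: the statement is the Claim_ definition above) =====
theorem divide1_spec : Claim_equal_divide1 := by
  intro x y hdom hpre
  have hy : (0:Int) < |y| := by
    have : y ≠ 0 := hpre
    exact abs_pos.mpr this
  have hx0 : (0:Int) ≤ |x| := abs_nonneg x
  have hxb : |x| < |y| * 2 ^ 33 := by
    have hdx : -2147483648 ≤ x ∧ x ≤ 2147483648 := by
      simp [Dom_divide1, pvDomInt] at hdom; omega
    have h1 : |x| ≤ 2147483648 := abs_le.mpr ⟨hdx.1, hdx.2⟩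
    nlinarith
  simp only [Spec_divide1, divide1, divide1_alt, divide1_range_eq,
    divide1_fold_div |y| hy 33 |x| 0 hx0 hxb, PySem.Int.floordiv_eq_ediv_of_pos hy, zero_add]
  have hq0 : (0:Int) ≤ |x| / |y| := Int.ediv_nonneg hx0 (le_of_lt hy)
  congr 2
  rcases lt_trichotomy x 0 with hxs | hxs | hxs <;>
    rcases lt_trichotomy y 0 with hys | hys | hys <;>
    simp_all <;> omega
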